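-- pv_equiv track=rewrite | github.com/vedavv/crj-engine | tests/test_integration.py | _stable_swaras
-- ===== SOURCE A (Python) =====
-- def _stable_swaras(detected_swaras: list[str], min_run: int = 5) -> list[str]:
--     """Filter out brief transition artifacts — keep only swaras that appear
--     in at least *min_run* consecutive frames, then deduplicate."""
--     if not detected_swaras:
--         return []
--
--     # Find runs of consecutive identical swaras
--     stable = []
--     run_start = 0
--     for i in range(1, len(detected_swaras)):
--         if detected_swaras[i] != detected_swaras[run_start]:
--             if i - run_start >= min_run:
--                 stable.append(detected_swaras[run_start])
--             run_start = i
--     # Final run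
--     if len(detected_swaras) - run_start >= min_run:
--         stable.append(detected_swaras[run_start])
--
--     # Deduplicate consecutive
--     if not stable:
--         return []
--     deduped = [stable[0]]
--     for s in stable[1:]:
--         if s != deduped[-1]:
--             deduped.append(s)
--     return deduped
-- ===== SOURCE B (Python) =====
-- def _stable_swaras(detected_swaras: list[str], min_run: int = 5) -> list[str]:
--     """Sliding-window alternative: a position i is stable iff the window of
--     min_run frames starting at i fits and is constant; emit the value at each
--     stable position, collapsing consecutive duplicates on the fly."""
--     n = len(detected_swaras)
--     out = []
--     for i in range(n):
--         if i + min_run <= n and all(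
--             detected_swaras[j] == detected_swaras[i] for j in range(i + 1, i + min_run)
--         ):
--             v = detected_swaras[i]
--             if not out or out[-1] != v:
--                 out.append(v)
--     return out
-- ===== Notes on version B (the rewrite author's own statement) =====
-- stated objective: alternative
-- what changed: Replaces A's run-length detection (run_start tracking plus a second dedup pass over an intermediate 'stable' list) by a per-position sliding-window test: position i contributes its value iff the min_run-frame window starting at i fits and is constant, with consecutive duplicates collapsed on the fly; no runs and no intermediate list are ever computed.
import Mathlib
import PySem

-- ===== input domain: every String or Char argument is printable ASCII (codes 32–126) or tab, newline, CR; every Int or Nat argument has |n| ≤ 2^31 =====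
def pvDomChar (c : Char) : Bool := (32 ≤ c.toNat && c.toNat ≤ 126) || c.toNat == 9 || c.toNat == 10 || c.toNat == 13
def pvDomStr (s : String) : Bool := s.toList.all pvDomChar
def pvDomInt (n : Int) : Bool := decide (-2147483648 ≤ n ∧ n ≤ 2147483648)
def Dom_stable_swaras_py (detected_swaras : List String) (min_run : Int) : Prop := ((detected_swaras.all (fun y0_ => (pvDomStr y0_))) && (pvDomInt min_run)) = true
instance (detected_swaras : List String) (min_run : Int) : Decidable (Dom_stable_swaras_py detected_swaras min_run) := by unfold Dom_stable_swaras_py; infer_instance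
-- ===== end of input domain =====

-- B drops A's run detection entirely: it tests each position's min_run-frame window for
-- constancy and dedups on the fly (alternative algorithm; not claimed faster).

-- ===== PORT A =====
-- loop body of 'for i in range(1, len(detected_swaras)):', state = (stable, run_start)
def pvStepA (ds : List String) (m : Int) (st : List String × Int) (i : Int) : List String × Int :=
  if PySem.List.pyGetD ds i "" ≠ PySem.List.pyGetD ds st.2 "" then
    ((if i - st.2 ≥ m then st.1 ++ [PySem.List.pyGetD ds st.2 ""] else st.1), i)
  else st

def stable_swaras_py (detected_swaras : List String) (min_run : Int) : List String :=
  if detected_swaras = [] then []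
  else
    let st := (PySem.List.pyRange 1 (detected_swaras.length : Int) 1).foldl
      (pvStepA detected_swaras min_run) ([], 0)
    -- final run
    let stable := if (detected_swaras.length : Int) - st.2 ≥ min_run then
        st.1 ++ [PySem.List.pyGetD detected_swaras st.2 ""] else st.1
    if stable = [] then []
    else
      (PySem.List.slice stable (some 1) none).foldl
        (fun deduped s => if s ≠ PySem.List.pyGetD deduped (-1) "" then deduped ++ [s] else deduped)
        [PySem.List.pyGetD stable 0 ""]

-- ===== PORT B =====
-- loop body of 'for i in range(n):' — window test, then conditional append
def pvStepB (ds : List String) (m : Int) (out : List String) (i : Int) : List String :=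
  if (decide (i + m ≤ (ds.length : Int))
      && ((PySem.List.pyRange (i + 1) (i + m) 1).all
            (fun j => PySem.List.pyGetD ds j "" == PySem.List.pyGetD ds i ""))) then
    if out = [] ∨ PySem.List.pyGetD out (-1) "" ≠ PySem.List.pyGetD ds i "" then
      out ++ [PySem.List.pyGetD ds i ""]
    else out
  else out

def stable_swaras_py_alt (detected_swaras : List String) (min_run : Int) : List String :=
  (PySem.List.pyRange 0 (detected_swaras.length : Int) 1).foldl
    (pvStepB detected_swaras min_run) []

-- ===== PRECONDITION & SPEC =====
def Spec_stable_swaras_py (detected_swaras : List String) (min_run : Int) (out : List String) : Prop := out = stable_swaras_py_alt detected_swaras min_run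
instance (detected_swaras : List String) (min_run : Int) (out : List String) : Decidable (Spec_stable_swaras_py detected_swaras min_run out) := by unfold Spec_stable_swaras_py; infer_instance

-- ===== CLAIM (what is proved, stated in full; the proofs are below) =====
def Claim_equal_stable_swaras_py : Prop := ∀ (detected_swaras : List String) (min_run : Int), Dom_stable_swaras_py detected_swaras min_run → Spec_stable_swaras_py detected_swaras min_run (stable_swaras_py detected_swaras min_run)

-- ===== LEMMAS AND PROOFS =====

-- runs of consecutive identical swaras: (key, run length) of each maximal run
def pvGroupby : List String → List (String × Nat)
  | [] => []
  | x :: xs =>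
    (x, (xs.takeWhile (fun y => y = x)).length + 1) :: pvGroupby (xs.dropWhile (fun y => y = x))
termination_by xs => xs.length
decreasing_by
  exact Nat.lt_succ_of_le (List.length_dropWhile_le _ _)

-- Recursive characterisation of A's first phase: pending run has value v and length c.
def procA (m : Int) (v : String) (c : Nat) : List String → List String
  | [] => if (c : Int) ≥ m then [v] else []
  | x :: xs =>
    if x = v then procA m v (c + 1) xs
    else (if (c : Int) ≥ m then [v] else []) ++ procA m x 1 xs

-- Consecutive dedup relative to an optional last-kept element.
def dedupFrom (last : Option String) : List String → List String
  | [] => []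
  | x :: xs => if some x = last then dedupFrom last xs else x :: dedupFrom (some x) xs

-- keys of the long-enough runs
def keysF (m : Int) (rs : List (String × Nat)) : List String :=
  (rs.filter (fun p => (p.2 : Int) ≥ m)).map Prod.fst

-- B's window condition at a suffix x :: rest, and the per-position kept values
def winKeep (m : Int) (x : String) (rest : List String) : Bool :=
  decide (m ≤ (rest.length : Int) + 1) && (rest.take (m - 1).toNat).all (fun y => y == x)

def keptOf (m : Int) : List String → List String
  | [] => []
  | x :: rest => (if winKeep m x rest then [x] else []) ++ keptOf m rest

theorem keysF_cons (m : Int) (k : String) (c : Nat) (rs : List (String × Nat)) :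
    keysF m ((k, c) :: rs) = (if (c : Int) ≥ m then [k] else []) ++ keysF m rs := by
  simp only [keysF, List.filter_cons]
  split <;> simp_all

theorem pvGroupby_nil : pvGroupby [] = [] := by
  rw [pvGroupby.eq_def]

theorem pvGroupby_cons (x : String) (xs : List String) :
    pvGroupby (x :: xs)
      = (x, (xs.takeWhile (fun y => y = x)).length + 1) :: pvGroupby (xs.dropWhile (fun y => y = x)) := by
  rw [pvGroupby.eq_def]

theorem procA_eq_keysF (m : Int) (xs : List String) : ∀ (v : String) (c : Nat),
    procA m v c xs
      = keysF m ((v, c + (xs.takeWhile (fun y => y = v)).length) :: pvGroupby (xs.dropWhile (fun y => y = v))) := by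
  induction xs with
  | nil =>
    intro v c
    simp only [procA, List.takeWhile_nil, List.length_nil, Nat.add_zero, List.dropWhile_nil,
      pvGroupby_nil]
    rw [keysF_cons]
    simp [keysF]
  | cons x xs ih =>
    intro v c
    by_cases h : x = v
    · subst h
      simp only [procA, List.takeWhile_cons, List.dropWhile_cons, decide_true, if_true]
      rw [ih x (c + 1)]
      have : c + (x :: xs.takeWhile (fun y => y = x)).length = c + 1 + (xs.takeWhile (fun y => y = x)).length := by
        simp; omega
      rw [this]
    · simp only [procA, List.takeWhile_cons, List.dropWhile_cons, decide_eq_true_eq,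
        if_neg h, List.length_nil, Nat.add_zero]
      rw [ih x 1, pvGroupby_cons, keysF_cons, keysF_cons, keysF_cons, Nat.add_comm 1]

-- A's scan loop (plus the final-run append) computes procA.
theorem loopA (ds : List String) (m : Int) (xs : List String) :
    ∀ (j r : Nat) (stable : List String), r ≤ j → j ≤ ds.length → ds.drop j = xs →
    (if (ds.length : Int) - ((PySem.List.pyRange (j : Int) (ds.length : Int) 1).foldl (pvStepA ds m) (stable, (r : Int))).2 ≥ m
      then ((PySem.List.pyRange (j : Int) (ds.length : Int) 1).foldl (pvStepA ds m) (stable, (r : Int))).1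
            ++ [PySem.List.pyGetD ds ((PySem.List.pyRange (j : Int) (ds.length : Int) 1).foldl (pvStepA ds m) (stable, (r : Int))).2 ""]
      else ((PySem.List.pyRange (j : Int) (ds.length : Int) 1).foldl (pvStepA ds m) (stable, (r : Int))).1)
    = stable ++ procA m (PySem.List.pyGetD ds (r : Int) "") (j - r) xs := by
  induction xs with
  | nil =>
    intro j r stable h1 h2 h3
    have hj : j = ds.length := by
      have := List.drop_eq_nil_iff.mp h3
      omega
    subst hj
    rw [PySem.List.pyRange_one_eq_nil (by omega)]
    simp only [List.foldl_nil, procA]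
    have hc : ((ds.length : Int) - (r : Int) ≥ m) ↔ (((ds.length - r : Nat) : Int) ≥ m) := by omega
    rw [if_congr hc rfl rfl]
    split <;> simp
  | cons x l ih =>
    intro j r stable h1 h2 h3
    have hjlt : j < ds.length := by
      by_contra hge
      rw [List.drop_eq_nil_iff.mpr (by omega)] at h3
      exact List.cons_ne_nil x l h3.symm
    have hx : PySem.List.pyGetD ds (j : Int) "" = x := by
      rw [PySem.List.pyGetD_natCast]
      have : ds.getD j "" = (ds.drop j).getD 0 "" := by
        simp [List.getD, List.getElem?_drop]
      rw [this, h3]; rfl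
    rw [PySem.List.pyRange_one_cons (by exact_mod_cast hjlt)]
    simp only [List.foldl_cons]
    by_cases hveq : x = PySem.List.pyGetD ds (r : Int) ""
    · have hstep : pvStepA ds m (stable, (r : Int)) (j : Int) = (stable, (r : Int)) := by
        simp [pvStepA, hx, hveq]
      rw [hstep]
      have := ih (j + 1) r stable (by omega) (by omega) (by rw [← List.tail_drop, h3]; rfl)
      rw [show ((j : Nat) + 1 : Int) = ((j + 1 : Nat) : Int) by push_cast; ring] at *
      rw [this]
      have : (j + 1 - r) = (j - r) + 1 := by omega
      rw [this, procA, if_pos hveq]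
    · have hstep : pvStepA ds m (stable, (r : Int)) (j : Int)
          = ((if (j : Int) - (r : Int) ≥ m then stable ++ [PySem.List.pyGetD ds (r : Int) ""] else stable), (j : Int)) := by
        simp only [pvStepA, hx]
        rw [if_pos hveq]
      rw [hstep]
      have := ih (j + 1) j (if (j : Int) - (r : Int) ≥ m then stable ++ [PySem.List.pyGetD ds (r : Int) ""] else stable)
        (by omega) (by omega) (by rw [← List.tail_drop, h3]; rfl)
      rw [show ((j : Nat) + 1 : Int) = ((j + 1 : Nat) : Int) by push_cast; ring] at *
      rw [this]
      rw [procA, if_neg hveq, hx, show j + 1 - j = 1 from by omega]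
      have hc : ((j : Int) - (r : Int) ≥ m) ↔ (((j - r : Nat) : Int) ≥ m) := by omega
      rw [if_congr hc rfl rfl]
      split <;> simp

-- A's second loop is dedupFrom relative to the last kept element.
theorem dedupFold (l : List String) : ∀ (acc : List String), acc ≠ [] →
    l.foldl (fun deduped s => if s ≠ PySem.List.pyGetD deduped (-1) "" then deduped ++ [s] else deduped) acc
      = acc ++ dedupFrom acc.getLast? l := by
  induction l with
  | nil => intro acc _; simp [dedupFrom]
  | cons x t ih =>
    intro acc h
    rw [List.foldl_cons]
    have hlast : PySem.List.pyGetD acc (-1) "" = acc.getLast h := PySem.List.pyGetD_neg_one acc "" h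
    have hlast? : acc.getLast? = some (acc.getLast h) := List.getLast?_eq_some_getLast h
    by_cases hx : x = acc.getLast h
    · rw [if_neg (by simp [hlast, hx])]
      rw [ih acc h, hlast?]
      simp [dedupFrom, hx]
    · rw [if_pos (by simp [hlast, hx])]
      rw [ih (acc ++ [x]) (by simp)]
      rw [List.getLast?_concat]
      simp only [dedupFrom, hlast?]
      rw [if_neg (by simp [hx])]
      simp

theorem dedupFrom_none (S : List String) :
    (if S = [] then []
     else (PySem.List.slice S (some 1) none).foldl
        (fun deduped s => if s ≠ PySem.List.pyGetD deduped (-1) "" then deduped ++ [s] else deduped)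
        [PySem.List.pyGetD S 0 ""])
    = dedupFrom none S := by
  cases S with
  | nil => simp [dedupFrom]
  | cons s0 st =>
    rw [if_neg (by simp), PySem.List.slice_from_one]
    simp only [List.tail_cons, PySem.List.pyGetD_zero_cons]
    rw [dedupFold st [s0] (by simp)]
    simp [dedupFrom]

-- ----- B-side lemmas -----

-- the inner 'all' over an index range equals an 'all' over the corresponding suffix prefix
theorem rangeAll (ds : List String) (v : String) : ∀ (k p : Nat) (l : List String),
    p + k ≤ ds.length → ds.drop p = l →
    ((PySem.List.pyRange (p : Int) ((p + k : Nat) : Int) 1).all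
        (fun t => PySem.List.pyGetD ds t "" == v))
      = (l.take k).all (fun y => y == v) := by
  intro k
  induction k with
  | zero =>
    intro p l _ _
    rw [Nat.add_zero, PySem.List.pyRange_one_eq_nil (by omega)]
    simp
  | succ k ih =>
    intro p l hlen hdrop
    have hplt : p < ds.length := by omega
    cases l with
    | nil =>
      exfalso
      have := List.drop_eq_nil_iff.mp hdrop
      omega
    | cons x0 l0 =>
      have hx0 : PySem.List.pyGetD ds (p : Int) "" = x0 := by
        rw [PySem.List.pyGetD_natCast]
        have : ds.getD p "" = (ds.drop p).getD 0 "" := by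
          simp [List.getD, List.getElem?_drop]
        rw [this, hdrop]; rfl
      rw [PySem.List.pyRange_one_cons (by exact_mod_cast (by omega : p < p + (k + 1)))]
      simp only [List.all_cons, hx0, List.take_succ_cons]
      have hcast : ((p + (k + 1) : Nat) : Int) = (((p + 1) + k : Nat) : Int) := by push_cast; ring
      have hdrop' : ds.drop (p + 1) = l0 := by rw [← List.tail_drop, hdrop]; rfl
      have := ih (p + 1) l0 (by omega) hdrop'
      rw [show ((p : Nat) : Int) + 1 = ((p + 1 : Nat) : Int) by push_cast; ring, hcast, this]

-- B's loop condition at position j equals winKeep on the suffix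
theorem condEq (ds : List String) (m : Int) (j : Nat) (x : String) (l : List String)
    (h2 : j ≤ ds.length) (h3 : ds.drop j = x :: l) :
    (decide ((j : Int) + m ≤ (ds.length : Int))
      && ((PySem.List.pyRange ((j : Int) + 1) ((j : Int) + m) 1).all
            (fun t => PySem.List.pyGetD ds t "" == PySem.List.pyGetD ds (j : Int) "")))
      = winKeep m x l := by
  have hlen : ds.length = j + l.length + 1 := by
    have := congrArg List.length h3
    simp at this
    omega
  have hx : PySem.List.pyGetD ds (j : Int) "" = x := by
    rw [PySem.List.pyGetD_natCast]
    have : ds.getD j "" = (ds.drop j).getD 0 "" := by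
      simp [List.getD, List.getElem?_drop]
    rw [this, h3]; rfl
  have hfst : ((j : Int) + m ≤ (ds.length : Int)) ↔ (m ≤ (l.length : Int) + 1) := by omega
  by_cases hm1 : m ≤ (l.length : Int) + 1
  · rw [winKeep]
    simp only [hx]
    rw [decide_eq_true (hfst.mpr hm1), decide_eq_true hm1, Bool.true_and, Bool.true_and]
    by_cases hm2 : m ≤ 1
    · rw [PySem.List.pyRange_one_eq_nil (by omega)]
      rw [show (m - 1).toNat = 0 by omega]
      simp
    · have hk : (j : Int) + m = (((j + 1) + (m - 1).toNat : Nat) : Int) := by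
        push_cast; omega
      rw [hk, show ((j : Int) + 1) = ((j + 1 : Nat) : Int) by push_cast; ring]
      exact rangeAll ds x (m - 1).toNat (j + 1) l (by omega)
        (by rw [← List.tail_drop, h3]; rfl)
  · rw [winKeep]
    rw [decide_eq_false (by rw [hfst]; exact hm1), decide_eq_false hm1]
    simp

-- B's fold is dedupFrom of the per-position kept values.
theorem loopB (ds : List String) (m : Int) : ∀ (xs : List String) (j : Nat) (acc : List String),
    j ≤ ds.length → ds.drop j = xs →
    (PySem.List.pyRange (j : Int) (ds.length : Int) 1).foldl (pvStepB ds m) acc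
      = acc ++ dedupFrom acc.getLast? (keptOf m xs) := by
  intro xs
  induction xs with
  | nil =>
    intro j acc h2 h3
    have hj : j = ds.length := by
      have := List.drop_eq_nil_iff.mp h3
      omega
    subst hj
    rw [PySem.List.pyRange_one_eq_nil (by omega)]
    simp [keptOf, dedupFrom]
  | cons x l ih =>
    intro j acc h2 h3
    have hjlt : j < ds.length := by
      by_contra hge
      rw [List.drop_eq_nil_iff.mpr (by omega)] at h3
      exact List.cons_ne_nil x l h3.symm
    have hx : PySem.List.pyGetD ds (j : Int) "" = x := by
      rw [PySem.List.pyGetD_natCast]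
      have : ds.getD j "" = (ds.drop j).getD 0 "" := by
        simp [List.getD, List.getElem?_drop]
      rw [this, h3]; rfl
    rw [PySem.List.pyRange_one_cons (by exact_mod_cast hjlt)]
    simp only [List.foldl_cons]
    have hdrop' : ds.drop (j + 1) = l := by rw [← List.tail_drop, h3]; rfl
    have hcond := condEq ds m j x l (by omega) h3
    rw [show keptOf m (x :: l) = (if winKeep m x l then [x] else []) ++ keptOf m l from rfl]
    by_cases hw : winKeep m x l
    · have hstep : pvStepB ds m acc (j : Int)
          = if acc = [] ∨ PySem.List.pyGetD acc (-1) "" ≠ x then acc ++ [x] else acc := by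
        rw [pvStepB, if_pos (by rw [hcond]; exact hw), hx]
      rw [hstep, if_pos hw]
      rcases acc.eq_nil_or_concat with hacc | ⟨ys, y, hacc⟩
      · subst hacc
        rw [if_pos (Or.inl rfl)]
        have := ih (j + 1) ([] ++ [x]) (by omega) hdrop'
        rw [show ((j : Nat) : Int) + 1 = ((j + 1 : Nat) : Int) by push_cast; ring, this]
        simp [dedupFrom]
      · rw [List.concat_eq_append] at hacc
        subst hacc
        have hlast : PySem.List.pyGetD (ys ++ [y]) (-1) "" = y :=
          PySem.List.pyGetD_neg_one_append_singleton ys y ""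
        have hlast? : (ys ++ [y]).getLast? = some y := by simp
        by_cases hxy : x = y
        · rw [if_neg (by simp [hlast, hxy])]
          have := ih (j + 1) (ys ++ [y]) (by omega) hdrop'
          rw [show ((j : Nat) : Int) + 1 = ((j + 1 : Nat) : Int) by push_cast; ring, this, hlast?]
          simp [dedupFrom, hxy]
        · rw [if_pos (Or.inr (by rw [hlast]; exact fun h => hxy h.symm))]
          have := ih (j + 1) (ys ++ [y] ++ [x]) (by omega) hdrop'
          rw [show ((j : Nat) : Int) + 1 = ((j + 1 : Nat) : Int) by push_cast; ring, this]
          have h2' : (ys ++ [y] ++ [x]).getLast? = some x := by simp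
          rw [h2', hlast?]
          simp only [List.singleton_append, dedupFrom]
          rw [if_neg (by simp [hxy])]
          simp
    · have hstep : pvStepB ds m acc (j : Int) = acc := by
        rw [pvStepB, if_neg (by rw [hcond]; exact hw)]
      rw [hstep, if_neg hw]
      have := ih (j + 1) acc (by omega) hdrop'
      rw [show ((j : Nat) : Int) + 1 = ((j + 1 : Nat) : Int) by push_cast; ring, this]
      simp

-- head of dropWhile fails the predicate
theorem headDropWhile (p : String → Bool) : ∀ (l : List String) (y : String),
    (l.dropWhile p).head? = some y → p y = false := by
  intro l
  induction l with
  | nil => intro y h; simp [List.dropWhile] at h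
  | cons a t ih =>
    intro y h
    rw [List.dropWhile_cons] at h
    by_cases hp : p a
    · rw [if_pos hp] at h; exact ih y h
    · rw [if_neg hp] at h
      simp at h
      subst h
      exact Bool.eq_false_iff.mpr hp

-- winKeep on a run of k copies of x followed by a block not starting with x
theorem winKeep_replicate (m : Int) (x : String) (k : Nat) (d : List String)
    (hd : d.head? ≠ some x) :
    winKeep m x (List.replicate k x ++ d) = decide (m ≤ (k : Int) + 1) := by
  rw [winKeep]
  simp only [List.length_append, List.length_replicate]
  by_cases hm : m ≤ (k : Int) + 1
  · rw [decide_eq_true hm, decide_eq_true (by push_cast; omega), Bool.true_and]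
    have htk : (List.replicate k x ++ d).take (m - 1).toNat
        = List.replicate (m - 1).toNat x := by
      rw [List.take_append]
      rw [show (m - 1).toNat - (List.replicate k x).length = 0 by simp; omega]
      rw [List.take_replicate, List.take_zero, List.append_nil]
      congr 1
      simp; omega
    rw [htk]
    simp
  · rw [decide_eq_false hm]
    by_cases hlen : m ≤ ((k + d.length : Nat) : Int) + 1
    · rw [decide_eq_true (by push_cast at hlen ⊢; omega), Bool.true_and]
      -- the window reaches into d: element at index k is d.head ≠ x
      cases d with
      | nil => exfalso; push_cast at hlen; simp at hlen; omega
      | cons y d' =>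
        have hyx : ¬ (y = x) := fun hcontr => hd (by rw [hcontr]; rfl)
        apply List.all_eq_false.mpr
        refine ⟨y, ?_, by simp [hyx]⟩
        have hky : k < (m - 1).toNat := by push_cast at hlen; omega
        rw [List.take_append]
        apply List.mem_append.mpr
        right
        rw [show (m - 1).toNat - (List.replicate k x).length = ((m-1).toNat - k) by simp]
        have : 1 ≤ (m - 1).toNat - k := by omega
        cases h' : (m - 1).toNat - k with
        | zero => omega
        | succ t => simp [List.take_succ_cons]
    · rw [decide_eq_false (by push_cast at hlen ⊢; omega), Bool.false_and]

-- dedup helpers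
theorem dedup_cons_congr (x : String) (K L : List String)
    (h : ∀ l', dedupFrom l' K = dedupFrom l' L) (last : Option String) :
    dedupFrom last (x :: K) = dedupFrom last (x :: L) := by
  simp only [dedupFrom]
  split
  · exact h last
  · rw [h (some x)]

theorem dedup_cons_cons (last : Option String) (x : String) (L : List String) :
    dedupFrom last (x :: x :: L) = dedupFrom last (x :: L) := by
  by_cases h : some x = last
  · simp [dedupFrom, h]
  · simp [dedupFrom, h]

-- dedup of the kept values of one run of k+1 copies of x
theorem runDedup (m : Int) (x : String) : ∀ (k : Nat) (d : List String),
    d.head? ≠ some x → ∀ (last : Option String),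
    dedupFrom last (keptOf m (List.replicate (k + 1) x ++ d))
      = dedupFrom last ((if m ≤ (k : Int) + 1 then [x] else []) ++ keptOf m d) := by
  intro k
  induction k with
  | zero =>
    intro d hd last
    rw [show List.replicate 1 x ++ d = x :: d by rfl]
    rw [show keptOf m (x :: d) = (if winKeep m x d then [x] else []) ++ keptOf m d from rfl]
    rw [show winKeep m x d = winKeep m x (List.replicate 0 x ++ d) by simp,
      winKeep_replicate m x 0 d hd]
    simp only [Nat.cast_zero]
    by_cases hm : m ≤ (0 : Int) + 1
    · rw [if_pos (by simpa using hm), if_pos hm]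
    · rw [if_neg (by simpa using hm), if_neg hm]
  | succ k ih =>
    intro d hd last
    rw [show List.replicate (k + 1 + 1) x ++ d = x :: (List.replicate (k + 1) x ++ d) by rfl]
    rw [show keptOf m (x :: (List.replicate (k + 1) x ++ d))
        = (if winKeep m x (List.replicate (k + 1) x ++ d) then [x] else [])
          ++ keptOf m (List.replicate (k + 1) x ++ d) from rfl]
    rw [winKeep_replicate m x (k + 1) d hd]
    by_cases hm2 : m ≤ ((k + 1 : Nat) : Int) + 1
    · rw [if_pos (by simpa using hm2), if_pos (by push_cast at hm2 ⊢; omega)]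
      simp only [List.singleton_append]
      by_cases hm1 : m ≤ (k : Int) + 1
      · -- inner kept list still starts with x
        have hK : ∀ l', dedupFrom l' (keptOf m (List.replicate (k + 1) x ++ d))
            = dedupFrom l' (x :: keptOf m d) := by
          intro l'
          have := ih d hd l'
          rw [if_pos hm1] at this
          simpa using this
        rw [dedup_cons_congr x _ _ hK last, dedup_cons_cons]
      · have hK : ∀ l', dedupFrom l' (keptOf m (List.replicate (k + 1) x ++ d))
            = dedupFrom l' (keptOf m d) := by
          intro l'
          have := ih d hd l'
          rw [if_neg hm1] at this
          simpa using this
        exact dedup_cons_congr x _ _ hK last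
    · rw [if_neg (by simpa using hm2), if_neg (by push_cast at hm2 ⊢; omega)]
      simp only [List.nil_append]
      have := ih d hd last
      rw [if_neg (by push_cast at hm2 ⊢; omega)] at this
      simpa using this

-- dedup of the window-kept values = dedup of the long-run keys
theorem bridge (m : Int) : ∀ (n : Nat) (ds : List String), ds.length ≤ n →
    ∀ (last : Option String),
    dedupFrom last (keptOf m ds) = dedupFrom last (keysF m (pvGroupby ds)) := by
  intro n
  induction n with
  | zero =>
    intro ds h last
    have : ds = [] := List.eq_nil_of_length_eq_zero (by omega)
    subst this
    simp [keptOf, pvGroupby_nil, keysF]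
  | succ n ih =>
    intro ds h last
    cases ds with
    | nil => simp [keptOf, pvGroupby_nil, keysF]
    | cons x xs =>
      have ht : xs.takeWhile (fun y => y = x)
          = List.replicate (xs.takeWhile (fun y => y = x)).length x := by
        apply List.eq_replicate_of_mem
        intro b hb
        simpa using List.mem_takeWhile_imp hb
      have hds : x :: xs
          = List.replicate ((xs.takeWhile (fun y => y = x)).length + 1) x
              ++ xs.dropWhile (fun y => y = x) := by
        conv_lhs => rw [show xs = xs.takeWhile (fun y => y = x) ++ xs.dropWhile (fun y => y = x)
          from (List.takeWhile_append_dropWhile).symm]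
        rw [List.replicate_succ]
        conv_lhs => rw [ht]
        rw [List.cons_append]
      have hd : (xs.dropWhile (fun y => y = x)).head? ≠ some x := by
        intro hcontr
        have := headDropWhile (fun y => decide (y = x)) xs x hcontr
        simp at this
      rw [pvGroupby_cons, keysF_cons]
      rw [show keptOf m (x :: xs)
          = keptOf m (List.replicate ((xs.takeWhile (fun y => y = x)).length + 1) x
              ++ xs.dropWhile (fun y => y = x)) from by rw [← hds]]
      rw [runDedup m x _ _ hd last]
      have hdlen : (xs.dropWhile (fun y => y = x)).length ≤ n :=
        le_trans (List.length_dropWhile_le _ _) (by simpa using Nat.le_of_succ_le_succ h)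
      by_cases hm : m ≤ ((xs.takeWhile (fun y => y = x)).length : Int) + 1
      · rw [if_pos hm, if_pos (by push_cast; omega)]
        simp only [List.singleton_append]
        exact dedup_cons_congr x _ _ (fun l' => ih _ hdlen l') last
      · rw [if_neg hm, if_neg (by push_cast at hm ⊢; omega)]
        simp only [List.nil_append]
        exact ih _ hdlen last

-- ===== VERDICT (by name: the statement is the Claim_ definition above) =====
theorem stable_swaras_py_spec : Claim_equal_stable_swaras_py := by
  intro ds m _
  simp only [Spec_stable_swaras_py, stable_swaras_py, stable_swaras_py_alt]
  have hB : (PySem.List.pyRange 0 (ds.length : Int) 1).foldl (pvStepB ds m) []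
      = dedupFrom none (keysF m (pvGroupby ds)) := by
    have := loopB ds m ds 0 [] (by omega) rfl
    simp only [Nat.cast_zero] at this
    rw [this]
    simp only [List.nil_append, List.getLast?_nil]
    exact bridge m ds.length ds le_rfl none
  rw [hB]
  cases ds with
  | nil => simp [pvGroupby_nil, keysF, dedupFrom]
  | cons d tail =>
    rw [if_neg (by simp)]
    have H := loopA (d :: tail) m tail 1 0 [] (by omega) (by simp) (by rfl)
    simp only [Nat.cast_one, Nat.cast_zero, PySem.List.pyGetD_zero_cons, List.nil_append,
      Nat.sub_zero] at H
    rw [H, dedupFrom_none, procA_eq_keysF m tail d 1, pvGroupby_cons, Nat.add_comm 1]
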